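-- pv_equiv track=rewrite | github.com/nutbread/lex | src/lex.py | to_regex_class
-- ===== SOURCE A (Python) =====
-- def to_regex_class(obj):
-- 	s = [];
-- 	o = {};
--
-- 	for k in obj:
-- 		for c in k:
-- 			o[c] = True;
--
-- 	for k in o:
-- 		s.append(k);
--
-- 	return "".join(s);
-- ===== SOURCE B (Python) =====
-- def to_regex_class(obj):
--     def dedup(cs):
--         if not cs:
--             return []
--         c = cs[0]
--         return [c] + dedup([x for x in cs[1:] if x != c])
--     return "".join(dedup(list("".join(obj))))
-- ===== Notes on version B (the rewrite author's own statement) =====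
-- stated objective: alternative
-- what changed: Instead of A's dict-as-ordered-set filled by nested loops and then read out, B first concatenates all keys into one character list and then deduplicates it by structural recursion: keep the head, filter all later copies of it out of the tail, recurse — no dict or set is maintained.
import Mathlib
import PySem

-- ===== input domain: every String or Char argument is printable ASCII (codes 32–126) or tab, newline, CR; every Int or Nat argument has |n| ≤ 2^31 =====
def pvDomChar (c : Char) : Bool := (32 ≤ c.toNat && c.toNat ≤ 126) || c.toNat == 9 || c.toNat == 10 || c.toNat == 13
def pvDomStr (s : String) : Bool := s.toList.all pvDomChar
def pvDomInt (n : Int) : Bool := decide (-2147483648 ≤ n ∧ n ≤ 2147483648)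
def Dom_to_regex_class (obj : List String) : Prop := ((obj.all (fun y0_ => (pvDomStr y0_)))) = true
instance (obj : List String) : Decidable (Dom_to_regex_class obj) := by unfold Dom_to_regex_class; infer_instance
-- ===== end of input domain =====

-- B replaces A's dict-as-ordered-set (nested fill loops, then key extraction) by a
-- staged algorithm: concatenate all keys, then deduplicate by recursive head-keep /
-- filter-tail; objective: alternative (different algorithm, no dict/set maintained).

-- ===== PORT A =====
-- o[c] = True over all chars of all keys, then s collects o's keys; "".join of the
-- one-char strings is String.ofList of the char list (exact: each appended key is one char).
def to_regex_class (obj : List String) : String :=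
  String.ofList
    ((obj.foldl (fun d k => k.toList.foldl (fun d c => d.insert c true) d)
        (PySem.Dict.empty : PySem.Dict Char Bool)).keys.foldl (fun s k => s ++ [k]) [])

-- ===== PORT B =====
-- Source B's dedup: empty → [], else head :: dedup (tail with all copies of head filtered out)
def pvDedupB (xs : List Char) : List Char :=
  match xs with
  | [] => []
  | c :: cs => c :: pvDedupB (cs.filter (fun x => x != c))
termination_by xs.length
decreasing_by
  simpa using Nat.lt_succ_of_le (List.length_filter_le _ _)

-- list("".join(obj)) is the concatenation of the keys' char lists (exact)
def to_regex_class_alt (obj : List String) : String :=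
  String.ofList (pvDedupB (obj.flatMap String.toList))

-- ===== PRECONDITION & SPEC =====
def Spec_to_regex_class (obj : List String) (out : String) : Prop := out = to_regex_class_alt obj
instance (obj : List String) (out : String) : Decidable (Spec_to_regex_class obj out) := by unfold Spec_to_regex_class; infer_instance

-- ===== CLAIM (what is proved, stated in full; the proofs are below) =====
def Claim_equal_to_regex_class : Prop := ∀ (obj : List String), Dom_to_regex_class obj → Spec_to_regex_class obj (to_regex_class obj)

-- ===== LEMMAS AND PROOFS =====

-- A's dict keys after the nested fill loops = Set.update of the starting keys by the concatenation
lemma keys_outer (obj : List String) (d : PySem.Dict Char Bool) :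
    (obj.foldl (fun d k => k.toList.foldl (fun d c => d.insert c true) d) d).keys
      = PySem.Set.update d.keys (obj.flatMap String.toList) := by
  induction obj generalizing d with
  | nil => simp [PySem.Set.update]
  | cons k obj ih =>
    simp only [List.foldl_cons, List.flatMap_cons]
    rw [ih, PySem.Dict.keys_foldl_insert, PySem.Set.update_append]

-- filtering a set after adding one element
lemma filter_add (p : Char → Bool) (s : PySem.Set Char) (x : Char) :
    (PySem.Set.add s x).filter p
      = if p x then PySem.Set.add (s.filter p) x else s.filter p := by
  by_cases hm : x ∈ s
  · have hc : PySem.Set.contains s x = true := (PySem.Set.contains_iff s x).2 hm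
    have hc' : PySem.Set.contains (s.filter p) x = true ∨ p x = false := by
      by_cases hp : p x = true
      · exact Or.inl ((PySem.Set.contains_iff _ x).2 (List.mem_filter.2 ⟨hm, hp⟩))
      · exact Or.inr (by simpa using hp)
    simp only [PySem.Set.add, hc, if_true]
    rcases hc' with h | h
    · simp [h]
      exact fun hp => ⟨hm, hp⟩
    · simp [h]
  · have hc : PySem.Set.contains s x = false := by
      rw [← Bool.not_eq_true, PySem.Set.contains_iff]; exact hm
    have hm' : x ∉ s.filter p := fun h => hm (List.mem_filter.1 h).1
    have hc' : PySem.Set.contains (s.filter p) x = false := by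
      rw [← Bool.not_eq_true, PySem.Set.contains_iff]; exact hm'
    simp only [PySem.Set.add, hc, Bool.false_eq_true, if_false, List.filter_append,
      List.filter_cons, List.filter_nil, hc']
    by_cases hp : p x = true
    · simp [hp]
    · simp [hp]

-- filtering commutes with Set.update (hence with ofList)
lemma update_filter (p : Char → Bool) :
    ∀ (xs : List Char) (s : PySem.Set Char),
      (PySem.Set.update s xs).filter p = PySem.Set.update (s.filter p) (xs.filter p) := by
  intro xs
  induction xs with
  | nil => intro s; simp [PySem.Set.update]
  | cons x xs ih =>
    intro s
    rw [PySem.Set.update_cons, List.filter_cons, ih, filter_add]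
    by_cases hp : p x = true
    · rw [if_pos hp, if_pos hp, PySem.Set.update_cons]
    · rw [if_neg hp, if_neg hp]

lemma ofList_filter (p : Char → Bool) (xs : List Char) :
    PySem.Set.ofList (xs.filter p) = (PySem.Set.ofList xs).filter p := by
  have h := update_filter p xs []
  simp only [List.filter_nil] at h
  rw [PySem.Set.update_nil_left, PySem.Set.update_nil_left] at h
  exact h.symm

lemma pvDedupB_cons (c : Char) (cs : List Char) :
    pvDedupB (c :: cs) = c :: pvDedupB (cs.filter (fun x => x != c)) := by
  rw [pvDedupB]

-- B's recursive filter-dedup computes exactly set(xs) in first-occurrence order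
lemma pvDedupB_eq_ofList_aux :
    ∀ (n : ℕ) (xs : List Char), xs.length ≤ n → pvDedupB xs = PySem.Set.ofList xs := by
  intro n
  induction n with
  | zero =>
    intro xs h
    have : xs = [] := List.eq_nil_of_length_eq_zero (Nat.le_zero.1 h)
    subst this; rw [pvDedupB]; rfl
  | succ n ih =>
    intro xs h
    match xs with
    | [] => rw [pvDedupB]; rfl
    | c :: cs =>
      rw [pvDedupB_cons, ih _ (le_trans (List.length_filter_le _ _)
            (Nat.le_of_succ_le_succ (by simpa using h))),
          ofList_filter]
      have h0 : PySem.Set.ofList (c :: cs)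
          = PySem.Set.update (PySem.Set.add [] c) cs := by
        rw [← PySem.Set.update_nil_left, PySem.Set.update_cons]
      have h1 : PySem.Set.add ([] : PySem.Set Char) c = [c] := by
        simp [PySem.Set.add]
      rw [h0, h1, PySem.Set.update_eq_append_filter]
      simp only [List.singleton_append, List.cons.injEq, true_and]
      apply List.filter_congr
      intro x _
      have : PySem.Set.contains ([c] : PySem.Set Char) x = (x == c) := by
        by_cases hx : x = c
        · subst hx; simp
        · have : PySem.Set.contains ([c] : PySem.Set Char) x = false := by
            rw [← Bool.not_eq_true, PySem.Set.contains_iff]; simp [hx]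
          simp [this, hx]
      rw [this]
      simp [bne]

lemma pvDedupB_eq_ofList (xs : List Char) : pvDedupB xs = PySem.Set.ofList xs :=
  pvDedupB_eq_ofList_aux xs.length xs le_rfl

-- ===== VERDICT (by name: the statement is the Claim_ definition above) =====
theorem to_regex_class_spec : Claim_equal_to_regex_class := by
  intro obj _
  unfold Spec_to_regex_class to_regex_class to_regex_class_alt
  rw [PySem.List.foldl_append_singleton, keys_outer, pvDedupB_eq_ofList,
      PySem.Dict.keys_empty, PySem.Set.update_nil_left]
  rfl
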